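-- pv_equiv track=rewrite | github.com/MrBrantCode/unitest_baseline | mut_generate/mist_train_cf/cf_72282/solution.py | get_sum_dim_2
-- ===== SOURCE A (Python) =====
-- def get_sum_dim_2(arr):
--     row_sums = []
--     col_sums = []
--
--     # Compute the sum of elements along rows
--     for row in arr:
--         row_sum = 0
--         for elem in row:
--             row_sum += elem
--         row_sums.append(row_sum)
--
--     # Compute the sum of elements along columns
--     for col in zip(*arr):
--         col_sum = 0
--         for elem in col:
--             col_sum += elem
--         col_sums.append(col_sum)
--
--     # Find which row and column yield the maximum sum
--     max_row_sum_idx = row_sums.index(max(row_sums))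
--     max_col_sum_idx = col_sums.index(max(col_sums))
--
--     return row_sums, col_sums, max_row_sum_idx, max_col_sum_idx
-- ===== SOURCE B (Python) =====
-- def get_sum_dim_2(arr):
--     # single fused traversal: accumulate row sums and pairwise-add each row
--     # into the running column sums (zip truncates to the shortest row, as in A)
--     ncols = min(len(r) for r in arr)
--     col_sums = [0] * ncols
--     row_sums = []
--     for row in arr:
--         row_sums.append(sum(row))
--         col_sums = [c + e for c, e in zip(col_sums, row)]
--     max_row_sum_idx = row_sums.index(max(row_sums))
--     max_col_sum_idx = col_sums.index(max(col_sums))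
--     return row_sums, col_sums, max_row_sum_idx, max_col_sum_idx
-- ===== Notes on version B (the rewrite author's own statement) =====
-- stated objective: alternative
-- what changed: B makes one fused pass over the rows, pairwise-adding each row into running column sums, instead of A's two phases (row pass, then materialising the transpose with zip(*arr) and summing each column).
import Mathlib
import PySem

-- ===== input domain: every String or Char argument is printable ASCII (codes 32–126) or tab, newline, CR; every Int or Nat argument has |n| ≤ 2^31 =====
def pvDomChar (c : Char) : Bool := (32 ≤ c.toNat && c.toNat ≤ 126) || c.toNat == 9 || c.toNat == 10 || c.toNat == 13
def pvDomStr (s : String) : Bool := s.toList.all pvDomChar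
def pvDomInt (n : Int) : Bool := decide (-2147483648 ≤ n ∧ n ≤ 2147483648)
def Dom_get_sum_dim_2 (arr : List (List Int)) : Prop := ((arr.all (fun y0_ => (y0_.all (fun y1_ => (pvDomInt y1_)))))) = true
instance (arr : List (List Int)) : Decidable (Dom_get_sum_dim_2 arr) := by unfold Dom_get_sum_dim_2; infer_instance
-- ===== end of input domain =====

-- B fuses the two phases of A into one traversal of the rows (pairwise zip-adds
-- each row into running column sums instead of materialising zip(*arr)); same
-- cost class, alternative decomposition.

-- ===== PORT A =====
-- zip(*arr): hand port (no PySem primitive). Exact: Python's zip over the row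
-- iterators yields, for each j below the minimum row length, the column
-- [row[j] for row in arr]; zip() of an empty argument list yields nothing.
def pyZipStar (arr : List (List Int)) : List (List Int) :=
  match arr with
  | [] => []
  | _ :: _ =>
    (List.range (((arr.map List.length).min?).getD 0)).map
      (fun j => arr.map (fun row => row.getD j 0))

def get_sum_dim_2 (arr : List (List Int)) : List Int × List Int × Int × Int :=
  let row_sums := arr.foldl (fun acc row => acc ++ [row.foldl (fun s e => s + e) 0]) []
  let col_sums := (pyZipStar arr).foldl (fun acc col => acc ++ [col.foldl (fun s e => s + e) 0]) []
  -- max([]) raises ValueError in Python: such inputs are outside Pre_; .getD 0 is junk there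
  (row_sums, col_sums,
   (((PySem.List.index? row_sums ((PySem.List.max? row_sums (fun x => x)).getD 0)).getD 0 : Nat) : Int),
   (((PySem.List.index? col_sums ((PySem.List.max? col_sums (fun x => x)).getD 0)).getD 0 : Nat) : Int))

-- ===== PORT B =====
def get_sum_dim_2_alt (arr : List (List Int)) : List Int × List Int × Int × Int :=
  let ncols := ((arr.map List.length).min?).getD 0   -- min() of an empty generator raises: outside Pre_
  let rc := arr.foldl
      (fun (acc : List Int × List Int) row =>
        (acc.1 ++ [row.foldl (fun s e => s + e) 0], List.zipWith (fun c e => c + e) acc.2 row))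
      ([], List.replicate ncols 0)
  (rc.1, rc.2,
   (((PySem.List.index? rc.1 ((PySem.List.max? rc.1 (fun x => x)).getD 0)).getD 0 : Nat) : Int),
   (((PySem.List.index? rc.2 ((PySem.List.max? rc.2 (fun x => x)).getD 0)).getD 0 : Nat) : Int))

-- ===== PRECONDITION & SPEC =====
-- Pre_ excludes exactly the inputs on which A raises ValueError: empty arr
-- (max of empty row_sums) and arr with an empty row (zip(*arr) empty, max of
-- empty col_sums); B raises there too.
def Pre_get_sum_dim_2 (arr : List (List Int)) : Prop :=
  arr ≠ [] ∧ ∀ row ∈ arr, row ≠ []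
instance (arr : List (List Int)) : Decidable (Pre_get_sum_dim_2 arr) := by
  unfold Pre_get_sum_dim_2; infer_instance
def pvWitness_get_sum_dim_2 : List (List Int) := [[1, 2], [3, 4]]

def Spec_get_sum_dim_2 (arr : List (List Int)) (out : List Int × List Int × Int × Int) : Prop := out = get_sum_dim_2_alt arr
instance (arr : List (List Int)) (out : List Int × List Int × Int × Int) : Decidable (Spec_get_sum_dim_2 arr out) := by unfold Spec_get_sum_dim_2; infer_instance

-- ===== CLAIM (what is proved, stated in full; the proofs are below) =====
def Claim_equal_get_sum_dim_2 : Prop := ∀ (arr : List (List Int)), Dom_get_sum_dim_2 arr → Pre_get_sum_dim_2 arr → Spec_get_sum_dim_2 arr (get_sum_dim_2 arr)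

-- ===== LEMMAS AND PROOFS =====

-- the append-accumulator loop is a map
theorem foldl_append_map {α β : Type} (f : α → β) (l : List α) (init : List β) :
    l.foldl (fun acc x => acc ++ [f x]) init = init ++ l.map f := by
  induction l generalizing init with
  | nil => simp
  | cons h t ih => simp [ih]

theorem foldl_add_int (l : List Int) (a : Int) :
    l.foldl (fun s e => s + e) a = a + l.sum := by
  induction l generalizing a with
  | nil => simp
  | cons h t ih => simp [ih, add_assoc]

-- B's pair-state loop splits into the row-sum map and the column accumulation
theorem pairfold (arr : List (List Int)) (rs cs : List Int) :
    arr.foldl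
      (fun (acc : List Int × List Int) row =>
        (acc.1 ++ [row.foldl (fun s e => s + e) 0], List.zipWith (fun c e => c + e) acc.2 row))
      (rs, cs) =
    (rs ++ arr.map (fun row => row.foldl (fun s e => s + e) 0),
     arr.foldl (fun cs row => List.zipWith (fun c e => c + e) cs row) cs) := by
  induction arr generalizing rs cs with
  | nil => simp
  | cons h t ih => simp [ih]

theorem zipAdd_fold (arr : List (List Int)) (cs : List Int)
    (H : ∀ row ∈ arr, cs.length ≤ row.length) :
    (arr.foldl (fun cs row => List.zipWith (fun c e => c + e) cs row) cs).length = cs.length ∧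
    ∀ j, j < cs.length →
      (arr.foldl (fun cs row => List.zipWith (fun c e => c + e) cs row) cs).getD j 0 =
        cs.getD j 0 + (arr.map (fun r => r.getD j 0)).sum := by
  induction arr generalizing cs with
  | nil => simp
  | cons h t ih =>
    have hh : cs.length ≤ h.length := H h (by simp)
    have hlen : (List.zipWith (fun c e => c + e) cs h).length = cs.length := by
      simp [List.length_zipWith]; omega
    have H' : ∀ row ∈ t, (List.zipWith (fun c e => c + e) cs h).length ≤ row.length := by
      intro r hr; rw [hlen]; exact H r (by simp [hr])
    obtain ⟨ihlen, ihget⟩ := ih (List.zipWith (fun c e => c + e) cs h) H'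
    refine ⟨by simpa [hlen] using ihlen, ?_⟩
    intro j hj
    have hj' : j < (List.zipWith (fun c e => c + e) cs h).length := by omega
    have hzw : (List.zipWith (fun c e => c + e) cs h).getD j 0 = cs.getD j 0 + h.getD j 0 := by
      have hjc : j < cs.length := hj
      have hjh : j < h.length := by omega
      rw [List.getD_eq_getElem _ _ hj', List.getD_eq_getElem _ _ hjc, List.getD_eq_getElem _ _ hjh]
      simp
    simp only [List.foldl_cons, List.map_cons, List.sum_cons]
    rw [ihget j (by omega), hzw]
    ring

theorem min?_le_of_mem (l : List Nat) (x : Nat) (hx : x ∈ l) : (l.min?).getD 0 ≤ x := by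
  induction l with
  | nil => cases hx
  | cons h t ih =>
    rcases List.mem_cons.mp hx with rfl | hx'
    · cases ht : t.min? with
      | none => simp [List.min?_cons, ht]
      | some m => simp [List.min?_cons, ht]
    · have := ih hx'
      cases ht : t.min? with
      | none => cases t <;> simp_all
      | some m =>
        have hm : m ≤ x := by simpa [ht] using this
        simp [List.min?_cons, ht]; omega

-- ===== VERDICT (by name: the statement is the Claim_ definition above) =====
theorem get_sum_dim_2_spec : Claim_equal_get_sum_dim_2 := by
  intro arr _ hpre
  obtain ⟨hne, hrows⟩ := hpre
  unfold Spec_get_sum_dim_2 get_sum_dim_2 get_sum_dim_2_alt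
  simp only [pairfold, List.nil_append]
  set n : Nat := ((arr.map List.length).min?).getD 0 with hn
  have hmin : ∀ row ∈ arr, n ≤ row.length := by
    intro r hr
    exact min?_le_of_mem _ _ (List.mem_map_of_mem hr)
  -- A's column sums = the canonical range form
  have hA : (pyZipStar arr).foldl (fun acc col => acc ++ [col.foldl (fun s e => s + e) 0]) [] =
      (List.range n).map (fun j => 0 + (arr.map (fun r => r.getD j 0)).sum) := by
    cases arr with
    | nil => exact absurd rfl hne
    | cons h t =>
      rw [show pyZipStar (h :: t) =
        (List.range (((List.map List.length (h :: t)).min?).getD 0)).map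
          (fun j => (h :: t).map (fun row => row.getD j 0)) from rfl]
      rw [foldl_append_map, List.nil_append, List.map_map, ← hn]
      apply List.map_congr_left
      intro j _
      simp [foldl_add_int]
  -- B's column sums agree with the range form elementwise
  obtain ⟨hBlen, hBget⟩ := zipAdd_fold arr (List.replicate n 0)
    (by intro r hr; simpa using hmin r hr)
  have hB : (arr.foldl (fun cs row => List.zipWith (fun c e => c + e) cs row)
      (List.replicate n 0)) =
      (List.range n).map (fun j => 0 + (arr.map (fun r => r.getD j 0)).sum) := by
    apply List.ext_getElem
    · simp [hBlen]
    · intro j h1 h2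
      have hjn : j < n := by simpa [hBlen] using h1
      have := hBget j (by simpa using hjn)
      rw [List.getD_eq_getElem _ _ h1] at this
      rw [List.getElem_map, List.getElem_range, this]
      simp [hjn]
  rw [hA, ← hB, foldl_append_map (fun row => row.foldl (fun s e => s + e) 0) arr ([] : List Int),
    List.nil_append]
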